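-- pv_equiv track=rewrite | github.com/kevinchu-linkai/Regulatory-Document-Summarization-Tool | app_tk.py | chunk_and_truncate
-- ===== SOURCE A (Python) =====
-- def chunk_and_truncate(text, max_tokens=8192):
--     words = text.split()
--     chunks = []
--     current_chunk = []
--     current_token_count = 0
--
--     for word in words:
--         if current_token_count + len(word.split()) > max_tokens:
--             chunks.append(' '.join(current_chunk))
--             current_chunk = [word]
--             current_token_count = len(word.split())
--         else:
--             current_chunk.append(word)
--             current_token_count += len(word.split())
--
--     if current_chunk:
--         chunks.append(' '.join(current_chunk))
--
--     return chunks
-- ===== SOURCE B (Python) =====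
-- def chunk_and_truncate(text, max_tokens=8192):
--     # Each whitespace-split word counts as one token, so chunking is just
--     # slicing the word list into consecutive runs of max_tokens words.
--     words = text.split()
--     step = max_tokens if max_tokens > 0 else 1
--     chunks = []
--     while words:
--         chunks.append(' '.join(words[:step]))
--         words = words[step:]
--     return chunks
-- ===== Notes on version B (the rewrite author's own statement) =====
-- stated objective: simpler
-- what changed: Replaces the running token-count accumulator with if/else flush by directly slicing the split word list into consecutive runs of max_tokens words (each split word is exactly one token).
-- intended difference: For max_tokens <= 0 on text containing at least one word, A's first comparison flushes the empty accumulator and it returns [''] followed by each word as its own chunk; B returns just each word as its own chunk, the intended grouping without the spurious empty first chunk. — e.g. on chunk_and_truncate("a b", 0): A returns ["", "a", "b"], B returns ["a", "b"]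
import Mathlib
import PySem

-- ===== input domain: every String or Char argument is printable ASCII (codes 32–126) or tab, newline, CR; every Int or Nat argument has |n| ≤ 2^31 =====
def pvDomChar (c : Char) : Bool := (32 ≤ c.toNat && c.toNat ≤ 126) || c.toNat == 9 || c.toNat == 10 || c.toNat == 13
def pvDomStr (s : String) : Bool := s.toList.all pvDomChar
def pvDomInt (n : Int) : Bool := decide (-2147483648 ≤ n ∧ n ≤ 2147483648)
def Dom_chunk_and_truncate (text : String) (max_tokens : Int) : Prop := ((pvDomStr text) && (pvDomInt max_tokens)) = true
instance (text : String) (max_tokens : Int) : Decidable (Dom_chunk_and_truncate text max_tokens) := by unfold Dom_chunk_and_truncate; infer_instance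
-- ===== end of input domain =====

-- B replaces A's running token-count accumulator (each split word is one token) by slicing the
-- word list into consecutive runs of max_tokens words: simpler, same O(n) cost; for
-- max_tokens ≤ 0 on non-blank text B drops A's spurious empty first chunk (see D_ below).


-- ===== PORT A =====
-- loop body of A's for-loop: state = (chunks, current_chunk, current_token_count)
def pvStepA (max_tokens : Int) (st : List String × List String × Int) (word : String) :
    List String × List String × Int :=
  if st.2.2 + ((PySem.Str.split₀ word).length : Int) > max_tokens then
    (st.1 ++ [PySem.Str.join " " st.2.1], [word], ((PySem.Str.split₀ word).length : Int))
  else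
    (st.1, st.2.1 ++ [word], st.2.2 + ((PySem.Str.split₀ word).length : Int))

def chunk_and_truncate (text : String) (max_tokens : Int) : List String :=
  let words := PySem.Str.split₀ text
  let fin := words.foldl (pvStepA max_tokens) ([], [], 0)
  if fin.2.1 ≠ [] then fin.1 ++ [PySem.Str.join " " fin.2.1] else fin.1

-- ===== PORT B =====
-- B's while-loop: append ' '.join(words[:step]), continue with words[step:];
-- fuel (= initial word count) only makes the recursion total, it is never exhausted since step ≥ 1.
def pvChunkLoop (step : Int) (fuel : Nat) (chunks words : List String) : List String :=
  match fuel, words with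
  | _, [] => chunks
  | 0, _ => chunks
  | f + 1, ws =>
      pvChunkLoop step f
        (chunks ++ [PySem.Str.join " " (PySem.List.slice ws none (some step))])
        (PySem.List.slice ws (some step) none)

def chunk_and_truncate_alt (text : String) (max_tokens : Int) : List String :=
  let words := PySem.Str.split₀ text
  let step : Int := if max_tokens > 0 then max_tokens else 1
  pvChunkLoop step words.length [] words

-- ===== PRECONDITION & SPEC =====
-- For max_tokens ≤ 0 on text with at least one word, A flushes its empty accumulator first and
-- returns [''] followed by each word as its own chunk; B returns just each word as its own chunk,
-- the intended grouping without the spurious empty first chunk.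
def D_chunk_and_truncate (text : String) (max_tokens : Int) : Prop :=
  max_tokens ≤ 0 ∧ PySem.Str.split₀ text ≠ []
instance (text : String) (max_tokens : Int) : Decidable (D_chunk_and_truncate text max_tokens) := by
  unfold D_chunk_and_truncate; infer_instance

def Spec_chunk_and_truncate (text : String) (max_tokens : Int) (out : List String) : Prop :=
  ¬ D_chunk_and_truncate text max_tokens → out = chunk_and_truncate_alt text max_tokens
instance (text : String) (max_tokens : Int) (out : List String) :
    Decidable (Spec_chunk_and_truncate text max_tokens out) := by
  unfold Spec_chunk_and_truncate; infer_instance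

def pvDiffWitness_chunk_and_truncate : String × Int := ("a b", 0)
def pvDiffWitnessOut_chunk_and_truncate : (List String) × (List String) :=
  (["", "a", "b"], ["a", "b"])

-- ===== CLAIM (what is proved, stated in full; the proofs are below) =====
def Claim_unchanged_chunk_and_truncate : Prop := ∀ (text : String) (max_tokens : Int), Dom_chunk_and_truncate text max_tokens → Spec_chunk_and_truncate text max_tokens (chunk_and_truncate text max_tokens)
def Claim_changed_chunk_and_truncate : Prop := Dom_chunk_and_truncate (pvDiffWitness_chunk_and_truncate.1) (pvDiffWitness_chunk_and_truncate.2) ∧ D_chunk_and_truncate (pvDiffWitness_chunk_and_truncate.1) (pvDiffWitness_chunk_and_truncate.2) ∧ chunk_and_truncate (pvDiffWitness_chunk_and_truncate.1) (pvDiffWitness_chunk_and_truncate.2) = pvDiffWitnessOut_chunk_and_truncate.1 ∧ chunk_and_truncate_alt (pvDiffWitness_chunk_and_truncate.1) (pvDiffWitness_chunk_and_truncate.2) = pvDiffWitnessOut_chunk_and_truncate.2 ∧ pvDiffWitnessOut_chunk_and_truncate.1 ≠ pvDiffWitnessOut_chunk_and_truncate.2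
def Claim_exact_chunk_and_truncate : Prop := ∀ (text : String) (max_tokens : Int), Dom_chunk_and_truncate text max_tokens → D_chunk_and_truncate text max_tokens → chunk_and_truncate text max_tokens ≠ chunk_and_truncate_alt text max_tokens

-- ===== LEMMAS AND PROOFS =====

-- every piece produced by Python's whitespace split is nonempty and whitespace-free
theorem pvGoodGo (s : List Char) : ∀ (cur : List Char) (acc : List (List Char)),
    (∀ c ∈ cur, PySem.Chars.isspace c = false) →
    (∀ w ∈ acc, w ≠ [] ∧ ∀ c ∈ w, PySem.Chars.isspace c = false) →
    ∀ w ∈ PySem.Chars.split₀.go s cur acc, w ≠ [] ∧ ∀ c ∈ w, PySem.Chars.isspace c = false := by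
  induction s with
  | nil =>
    intro cur acc hcur hacc w hw
    rw [PySem.Chars.split₀.go.eq_def] at hw
    by_cases hc : cur.isEmpty = true
    · simp [hc] at hw
      exact hacc w hw
    · simp [hc, List.mem_reverse] at hw
      rcases hw with h | h
      · exact hacc w h
      · subst h
        constructor
        · simp [List.isEmpty_iff] at hc
          simpa using hc
        · intro c hc'; exact hcur c (by simpa using hc')
  | cons c rest ih =>
    intro cur acc hcur hacc w hw
    rw [PySem.Chars.split₀.go.eq_def] at hw
    by_cases hsp : PySem.Chars.isspace c = true
    · by_cases hc : cur.isEmpty = true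
      · simp [hsp, hc] at hw
        exact ih [] acc (by simp) hacc w hw
      · simp [hsp, hc] at hw
        refine ih [] _ (by simp) ?_ w hw
        intro v hv
        rcases List.mem_cons.mp hv with h | h
        · subst h
          constructor
          · simp [List.isEmpty_iff] at hc; simpa using hc
          · intro d hd; exact hcur d (by simpa using hd)
        · exact hacc v h
    · simp [hsp] at hw
      refine ih (c :: cur) acc ?_ hacc w hw
      intro d hd
      rcases List.mem_cons.mp hd with h | h
      · subst h; simpa using hsp
      · exact hcur d h

theorem pvGood (s : List Char) :
    ∀ w ∈ PySem.Chars.split₀ s, w ≠ [] ∧ ∀ c ∈ w, PySem.Chars.isspace c = false := by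
  rw [PySem.Chars.split₀.eq_def]
  exact pvGoodGo s [] [] (by simp) (by simp)

theorem pvGoNoSpace (w : List Char) : ∀ (cur : List Char) (acc : List (List Char)),
    (∀ c ∈ w, PySem.Chars.isspace c = false) →
    PySem.Chars.split₀.go w cur acc = PySem.Chars.split₀.go [] (w.reverse ++ cur) acc := by
  induction w with
  | nil => intro cur acc _; simp
  | cons c rest ih =>
    intro cur acc hw
    have hc : PySem.Chars.isspace c = false := hw c (by simp)
    rw [PySem.Chars.split₀.go.eq_def]
    simp only [hc]
    rw [ih (c :: cur) acc (fun d hd => hw d (by simp [hd]))]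
    simp

theorem pvSplitSingle (w : List Char) (hne : w ≠ [])
    (hs : ∀ c ∈ w, PySem.Chars.isspace c = false) : PySem.Chars.split₀ w = [w] := by
  rw [PySem.Chars.split₀.eq_def, pvGoNoSpace w [] [] hs]
  rw [PySem.Chars.split₀.go.eq_def]
  simp [hne]

-- each word of text.split() is itself a single token: word.split() == [word]
theorem pvTokOne (text : String) : ∀ w ∈ PySem.Str.split₀ text, PySem.Str.split₀ w = [w] := by
  intro w hw
  rw [PySem.Str.split₀.eq_1] at hw
  rcases List.mem_map.mp hw with ⟨cs, hcs, rfl⟩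
  obtain ⟨hne, hsp⟩ := pvGood text.toList cs hcs
  rw [PySem.Str.split₀.eq_1]
  simp [pvSplitSingle cs (by simpa using hne) (by simpa using hsp)]

theorem pvJoinSingle (w : String) : PySem.Str.join " " [w] = w := by
  rw [← String.toList_inj]; simp [PySem.Chars.join_singleton]

theorem pvJoinNil : PySem.Str.join " " [] = "" := by
  rw [← String.toList_inj]; simp [PySem.Chars.join_nil]

theorem pvCL_nil (step : Int) (fuel : Nat) (chunks : List String) :
    pvChunkLoop step fuel chunks [] = chunks := by
  cases fuel <;> rfl

theorem pvCL_cons (step : Int) (hs : 1 ≤ step) (fuel : Nat) (chunks : List String)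
    (w : String) (ws : List String) :
    pvChunkLoop step (fuel + 1) chunks (w :: ws) =
      pvChunkLoop step fuel (chunks ++ [PySem.Str.join " " ((w :: ws).take step.toNat)])
        ((w :: ws).drop step.toNat) := by
  show pvChunkLoop step fuel _ _ = _
  rw [PySem.List.slice_to _ (by omega), PySem.List.slice_from _ (by omega)]

-- fuel is irrelevant as long as it covers the word count
theorem pvCL_fuel (step : Int) (hs : 1 ≤ step) : ∀ (fuel fuel' : Nat) (chunks words : List String),
    words.length ≤ fuel → words.length ≤ fuel' →
    pvChunkLoop step fuel chunks words = pvChunkLoop step fuel' chunks words := by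
  intro fuel
  induction fuel with
  | zero =>
    intro fuel' chunks words h _
    have : words = [] := List.eq_nil_of_length_eq_zero (by omega)
    subst this
    rw [pvCL_nil, pvCL_nil]
  | succ f ih =>
    intro fuel' chunks words h h'
    cases words with
    | nil => rw [pvCL_nil, pvCL_nil]
    | cons w ws =>
      cases fuel' with
      | zero => simp at h'
      | succ f' =>
        rw [pvCL_cons step hs, pvCL_cons step hs]
        apply ih
        · simp at h ⊢; omega
        · simp at h' ⊢; omega

-- A's loop, started on a nonempty partial chunk with correct count, is B's slicing loop
theorem pvMainA (mt : Int) (hmt : 1 ≤ mt) : ∀ (ws chunks cur : List String),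
    (∀ w ∈ ws, (PySem.Str.split₀ w).length = 1) → cur ≠ [] → (cur.length : Int) ≤ mt →
    (let fin := ws.foldl (pvStepA mt) (chunks, cur, (cur.length : Int));
     if fin.2.1 ≠ [] then fin.1 ++ [PySem.Str.join " " fin.2.1] else fin.1)
      = pvChunkLoop mt (cur ++ ws).length chunks (cur ++ ws) := by
  intro ws
  induction ws with
  | nil =>
    intro chunks cur _ hne hle
    simp only [List.foldl_nil, List.append_nil]
    have hcur : cur.length ≤ mt.toNat := by omega
    cases cur with
    | nil => exact absurd rfl hne
    | cons c cs =>
      rw [show (c :: cs).length = cs.length + 1 from rfl, pvCL_cons mt hmt]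
      rw [List.take_of_length_le hcur, List.drop_eq_nil_of_le hcur, pvCL_nil]
      simp [hne]
  | cons w rest ih =>
    intro chunks cur htok hne hle
    have hw1 : (PySem.Str.split₀ w).length = 1 := htok w (by simp)
    simp only [List.foldl_cons]
    by_cases hc : (cur.length : Int) + ((PySem.Str.split₀ w).length : Int) > mt
    · -- flush: current chunk is exactly full (length = mt)
      have hstep : pvStepA mt (chunks, cur, (cur.length : Int)) w
          = (chunks ++ [PySem.Str.join " " cur], [w], (([w].length : Nat) : Int)) := by
        unfold pvStepA
        rw [if_pos hc]
        simp [hw1]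
      rw [hstep, ih _ [w] (fun v hv => htok v (by simp [hv])) (by simp) (by simp; omega)]
      have hlen : cur.length = mt.toNat := by rw [hw1] at hc; omega
      have h1 : cur ++ w :: rest = cur ++ ([w] ++ rest) := by simp
      rw [h1]
      have hcons : ∃ c cs, cur ++ ([w] ++ rest) = c :: cs := by
        cases hcc : cur ++ ([w] ++ rest) with
        | nil => simp at hcc
        | cons c cs => exact ⟨c, cs, rfl⟩
      obtain ⟨c, cs, hcc⟩ := hcons
      have hlen2 : (cur ++ ([w] ++ rest)).length = (cur.length + ([w] ++ rest).length) := by simp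
      rw [hcc]
      have hfuel : cs.length + 1 = cur.length + ([w] ++ rest).length := by
        have := congrArg List.length hcc
        simp at this ⊢
        omega
      rw [show (c :: cs).length = cs.length + 1 from by simp]
      rw [pvCL_cons mt hmt, ← hcc]
      rw [show mt.toNat = cur.length from hlen.symm]
      rw [List.take_left, List.drop_left]
      apply pvCL_fuel mt hmt
      · simp
      · have := congrArg List.length hcc
        simp at this ⊢
        omega
    · -- accumulate
      have hstep : pvStepA mt (chunks, cur, (cur.length : Int)) w
          = (chunks, cur ++ [w], (((cur ++ [w]).length : Nat) : Int)) := by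
        unfold pvStepA
        rw [if_neg hc]
        simp [hw1]
      rw [hstep, ih chunks (cur ++ [w]) (fun v hv => htok v (by simp [hv])) (by simp)
        (by rw [hw1] at hc; simp; omega)]
      simp

-- A's loop for max_tokens ≤ 0: every word flushes, the first flush emits the empty chunk
theorem pvANeg (mt : Int) (hmt : mt ≤ 0) : ∀ (ws : List String), ws ≠ [] →
    (∀ w ∈ ws, (PySem.Str.split₀ w).length = 1) →
    ∀ (chunks cur : List String) (cnt : Int), 0 ≤ cnt →
    (let fin := ws.foldl (pvStepA mt) (chunks, cur, cnt);
     if fin.2.1 ≠ [] then fin.1 ++ [PySem.Str.join " " fin.2.1] else fin.1)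
      = chunks ++ PySem.Str.join " " cur :: ws.map (fun w => PySem.Str.join " " [w]) := by
  intro ws
  induction ws with
  | nil => intro h; exact absurd rfl h
  | cons w rest ih =>
    intro _ htok chunks cur cnt hcnt
    have hw1 : (PySem.Str.split₀ w).length = 1 := htok w (by simp)
    have hgt : cnt + ((PySem.Str.split₀ w).length : Int) > mt := by
      rw [hw1]; push_cast; omega
    have hstep : pvStepA mt (chunks, cur, cnt) w
        = (chunks ++ [PySem.Str.join " " cur], [w], ((PySem.Str.split₀ w).length : Int)) := by
      unfold pvStepA
      rw [if_pos hgt]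
    simp only [List.foldl_cons, hstep]
    cases rest with
    | nil => simp
    | cons v vs =>
      rw [ih (by simp) (fun u hu => htok u (by simp [hu])) _ [w] _ (by rw [hw1]; simp)]
      simp

-- B's loop with step 1 puts each word in its own chunk
theorem pvBOne : ∀ (fuel : Nat) (ws chunks : List String), ws.length ≤ fuel →
    pvChunkLoop 1 fuel chunks ws = chunks ++ ws.map (fun w => PySem.Str.join " " [w]) := by
  intro fuel
  induction fuel with
  | zero =>
    intro ws chunks h
    have : ws = [] := List.eq_nil_of_length_eq_zero (by omega)
    subst this
    simp [pvCL_nil]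
  | succ f ih =>
    intro ws chunks h
    cases ws with
    | nil => simp [pvCL_nil]
    | cons w ws' =>
      rw [pvCL_cons 1 le_rfl]
      simp only [Int.toNat_one, List.take_succ_cons, List.take_zero, List.drop_succ_cons,
        List.drop_zero]
      rw [ih ws' _ (by simp at h ⊢; omega)]
      simp

-- ===== VERDICT (by name: the statement is the Claim_ definition above) =====
theorem chunk_and_truncate_spec : Claim_unchanged_chunk_and_truncate := by
  intro text mt _hdom
  unfold Spec_chunk_and_truncate D_chunk_and_truncate
  intro hnd
  simp only [chunk_and_truncate, chunk_and_truncate_alt]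
  by_cases hm : mt ≤ 0
  · have hwords : PySem.Str.split₀ text = [] := by
      by_contra h; exact hnd ⟨hm, h⟩
    simp [hwords, pvCL_nil]
  · have hmt : 1 ≤ mt := by omega
    rw [if_pos (by omega : mt > 0)]
    cases hw : PySem.Str.split₀ text with
    | nil => simp [pvCL_nil]
    | cons w rest =>
      have htokAll := pvTokOne text
      rw [hw] at htokAll
      have hw1 : (PySem.Str.split₀ w).length = 1 := by
        rw [htokAll w (by simp)]; rfl
      have hstep0 : pvStepA mt ([], [], 0) w = ([], [w], (([w].length : Nat) : Int)) := by
        unfold pvStepA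
        rw [if_neg (by rw [hw1]; push_cast; omega)]
        simp [hw1]
      have hmain := pvMainA mt hmt rest [] [w]
        (fun v hv => by rw [htokAll v (by simp [hv])]; rfl)
        (by simp) (by simp; omega)
      simp only [] at hmain
      rw [List.foldl_cons, hstep0, hmain]
      simp

theorem chunk_and_truncate_changed : Claim_changed_chunk_and_truncate := by
  unfold Claim_changed_chunk_and_truncate; decide

theorem chunk_and_truncate_tight : Claim_exact_chunk_and_truncate := by
  intro text mt _hdom hD
  unfold D_chunk_and_truncate at hD
  obtain ⟨hmt, hwne⟩ := hD
  cases hw : PySem.Str.split₀ text with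
  | nil => exact absurd hw hwne
  | cons w rest =>
    have htokAll := pvTokOne text
    rw [hw] at htokAll
    have hmap : (w :: rest).map (fun v => PySem.Str.join " " [v]) = w :: rest := by
      rw [List.map_congr_left (fun v _ => pvJoinSingle v)]
      simp
    have hA : chunk_and_truncate text mt
        = "" :: (w :: rest).map (fun v => PySem.Str.join " " [v]) := by
      simp only [chunk_and_truncate]
      rw [hw]
      have h := pvANeg mt hmt (w :: rest) (by simp)
        (fun v hv => by rw [htokAll v hv]; rfl) [] [] 0 le_rfl
      simp only [] at h
      rw [h, pvJoinNil]
      simp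
    have hB : chunk_and_truncate_alt text mt = w :: rest := by
      simp only [chunk_and_truncate_alt]
      rw [hw, if_neg (by omega : ¬ mt > 0)]
      rw [pvBOne _ _ _ le_rfl, hmap]
      simp
    rw [hA, hB, hmap]
    intro h
    have := congrArg List.length h
    simp at this
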